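-- pv_equiv track=rewrite | github.com/KFClpy/KFC | test2/main.py | judgeDoubleandThree
-- ===== SOURCE A (Python) =====
-- def judgeThree_r(num_list):
--     count=0
--     while count<len(num_list[1])-2:
--         if num_list[1][count]==num_list[1][count+1] and num_list[1][count+1]==num_list[1][count+2]:
--             return num_list[1][count]
--         count+=1
--     else:
--         return 0
--
-- def judgeDoubleandThree(num_list):
--     count=0
--     while count<len(num_list[1])-1:
--         if num_list[1][count]==judgeThree_r(num_list):
--             count+=1
--             continue
--         if num_list[1][count]==num_list[1][count+1]:
--             return True
--         count+=1
--     else: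
--         return False
-- ===== SOURCE B (Python) =====
-- def judgeDoubleandThree(num_list):
--     xs = num_list[1]
--     # build the run-length encoding of xs in one pass (runs[-1] is the open run)
--     runs = []
--     for v in xs:
--         if runs and runs[-1][0] == v:
--             runs[-1] = (v, runs[-1][1] + 1)
--         else:
--             runs.append((v, 1))
--     # t = value of the first run of length >= 3, default 0 (as judgeThree_r)
--     t = 0
--     for v, n in runs:
--         if n >= 3:
--             t = v
--             break
--     # a qualifying pair is a run of length >= 2 whose value is not t
--     for v, n in runs:
--         if n >= 2 and v != t:
--             return True
--     return False
-- ===== Notes on version B (the rewrite author's own statement) =====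
-- stated objective: alternative
-- what changed: B builds the run-length encoding of num_list[1] once and reads the triple value (first run of length>=3, default 0) and the qualifying pair (a run of length>=2 with a different value) off the run table, instead of A's adjacent index scan that re-runs the triple finder on every iteration.
import Mathlib
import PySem

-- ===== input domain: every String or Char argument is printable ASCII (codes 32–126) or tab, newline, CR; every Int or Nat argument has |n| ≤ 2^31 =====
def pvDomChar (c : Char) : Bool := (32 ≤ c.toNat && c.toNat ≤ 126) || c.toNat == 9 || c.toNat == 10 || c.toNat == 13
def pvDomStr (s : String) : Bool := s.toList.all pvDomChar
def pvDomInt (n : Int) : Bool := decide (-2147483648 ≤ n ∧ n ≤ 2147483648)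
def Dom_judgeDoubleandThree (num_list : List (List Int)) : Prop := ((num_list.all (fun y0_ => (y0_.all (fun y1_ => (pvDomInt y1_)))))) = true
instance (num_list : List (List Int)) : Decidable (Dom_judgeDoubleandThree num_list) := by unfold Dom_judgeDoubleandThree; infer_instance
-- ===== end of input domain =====

-- B replaces A's adjacent index scan (which re-runs the triple finder on every iteration)
-- by one run-length-encoding pass plus two reads over the run table.

-- ===== PORT A =====
-- judgeThree_r's while loop: count < len(num_list[1])-2 ⇔ count+2 < len (count is a Nat);
-- fuel (≥ remaining iterations) only makes the recursion structural, the loop test is unchanged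
def judgeThreeRLoop (xs : List Int) (count : Nat) (fuel : Nat) : Int :=
  match fuel with
  | 0 => 0
  | f + 1 =>
    if count + 2 < xs.length then
      if xs.getD count 0 = xs.getD (count+1) 0 ∧ xs.getD (count+1) 0 = xs.getD (count+2) 0 then
        xs.getD count 0
      else
        judgeThreeRLoop xs (count+1) f
    else 0

-- num_list[1]: in range on every input admitted by Pre_ (getD default never read there)
def judgeThree_r (num_list : List (List Int)) : Int :=
  judgeThreeRLoop (num_list.getD 1 []) 0 (num_list.getD 1 []).length

-- judgeDoubleandThree's while loop: count < len(num_list[1])-1 (same fuel device)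
def judgeDoubleLoop (num_list : List (List Int)) (count : Nat) (fuel : Nat) : Bool :=
  match fuel with
  | 0 => false
  | f + 1 =>
    if count + 1 < (num_list.getD 1 []).length then
      if (num_list.getD 1 []).getD count 0 = judgeThree_r num_list then
        judgeDoubleLoop num_list (count+1) f
      else if (num_list.getD 1 []).getD count 0 = (num_list.getD 1 []).getD (count+1) 0 then
        true
      else
        judgeDoubleLoop num_list (count+1) f
    else false

def judgeDoubleandThree (num_list : List (List Int)) : Bool :=
  judgeDoubleLoop num_list 0 (num_list.getD 1 []).length

-- ===== PORT B =====
-- Source B's append-to-end run builder, as the standard cons-accumulator (acc head = runs[-1]) + reverse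
def rleStep (runs : List (Int × Nat)) (v : Int) : List (Int × Nat) :=
  match runs with
  | (w, n) :: rs => if w = v then (w, n+1) :: rs else (v, 1) :: (w, n) :: rs
  | [] => [(v, 1)]

-- t = value of the first run of length >= 3, default 0 (Source B's break-loop over runs)
def pickT (runs : List (Int × Nat)) : Int :=
  match runs.find? (fun p => decide (3 ≤ p.2)) with
  | some p => p.1
  | none => 0

def judgeDoubleandThree_alt (num_list : List (List Int)) : Bool :=
  let xs := num_list.getD 1 []
  let runs := (xs.foldl rleStep []).reverse
  let t : Int := pickT runs
  runs.any (fun p => decide (2 ≤ p.2) && decide (p.1 ≠ t))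

-- ===== PRECONDITION & SPEC =====
-- A evaluates num_list[1]: it raises IndexError when num_list has fewer than two elements.
def Pre_judgeDoubleandThree (num_list : List (List Int)) : Prop := 2 ≤ num_list.length
instance (num_list : List (List Int)) : Decidable (Pre_judgeDoubleandThree num_list) := by unfold Pre_judgeDoubleandThree; infer_instance
def pvWitness_judgeDoubleandThree : List (List Int) := [[0], [1, 1, 1, 2, 2]]

def Spec_judgeDoubleandThree (num_list : List (List Int)) (out : Bool) : Prop := out = judgeDoubleandThree_alt num_list
instance (num_list : List (List Int)) (out : Bool) : Decidable (Spec_judgeDoubleandThree num_list out) := by unfold Spec_judgeDoubleandThree; infer_instance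

-- ===== CLAIM (what is proved, stated in full; the proofs are below) =====
def Claim_equal_judgeDoubleandThree : Prop := ∀ (num_list : List (List Int)), Dom_judgeDoubleandThree num_list → Pre_judgeDoubleandThree num_list → Spec_judgeDoubleandThree num_list (judgeDoubleandThree num_list)

-- ===== LEMMAS AND PROOFS =====

-- structural (drop-based) versions of A's two loops
def jt' : List Int → Int
  | a :: b :: c :: rest => if a = b ∧ b = c then a else jt' (b :: c :: rest)
  | _ => 0

def jd' : List Int → Int → Bool
  | a :: b :: rest, t =>
      if a = t then jd' (b :: rest) t
      else if a = b then true
      else jd' (b :: rest) t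
  | _, _ => false

-- forward-order run builder (what foldl rleStep computes, reversed)
def rleFrom (w : Int) (n : Nat) : List Int → List (Int × Nat)
  | [] => [(w, n)]
  | v :: rest => if v = w then rleFrom w (n+1) rest else (w, n) :: rleFrom v 1 rest

lemma pickT_cons (w : Int) (n : Nat) (rs : List (Int × Nat)) :
    pickT ((w, n) :: rs) = if 3 ≤ n then w else pickT rs := by
  by_cases h : 3 ≤ n <;> simp [pickT, List.find?, h]

lemma jt'_short (l : List Int) (h : l.length ≤ 2) : jt' l = 0 := by
  match l with
  | [] => rfl
  | [_] => rfl
  | [_, _] => rfl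
  | _ :: _ :: _ :: _ => simp at h

lemma jd'_short (l : List Int) (t : Int) (h : l.length ≤ 1) : jd' l t = false := by
  match l with
  | [] => rfl
  | [_] => rfl
  | _ :: _ :: _ => simp at h

lemma jtLoop_eq_jt' (xs : List Int) (count fuel : Nat) (hf : xs.length ≤ count + fuel) :
    judgeThreeRLoop xs count fuel = jt' (xs.drop count) := by
  induction fuel generalizing count with
  | zero =>
      rw [judgeThreeRLoop]
      have hnil : xs.drop count = [] := List.drop_eq_nil_of_le (by omega)
      rw [hnil]
      rfl
  | succ f ih =>
      rw [judgeThreeRLoop]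
      by_cases h : count + 2 < xs.length
      · have h0 : count < xs.length := by omega
        have h1 : count + 1 < xs.length := by omega
        rw [List.drop_eq_getElem_cons h0, List.drop_eq_getElem_cons h1,
            List.drop_eq_getElem_cons h, jt']
        rw [if_pos h]
        by_cases heq : xs.getD count 0 = xs.getD (count+1) 0 ∧ xs.getD (count+1) 0 = xs.getD (count+2) 0
        · rw [if_pos heq, if_pos]
          · exact List.getD_eq_getElem xs 0 h0
          · rw [List.getD_eq_getElem xs 0 h0, List.getD_eq_getElem xs 0 h1,
                List.getD_eq_getElem xs 0 h] at heq
            exact heq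
        · rw [if_neg heq, if_neg, ih (count+1) (by omega),
              List.drop_eq_getElem_cons h1, List.drop_eq_getElem_cons h]
          intro hc
          apply heq
          rw [List.getD_eq_getElem xs 0 h0, List.getD_eq_getElem xs 0 h1,
              List.getD_eq_getElem xs 0 h]
          exact hc
      · rw [if_neg h, jt'_short]
        simp only [List.length_drop]
        omega

lemma jdLoop_eq_jd' (num_list : List (List Int)) (count fuel : Nat)
    (hf : (num_list.getD 1 []).length ≤ count + fuel) :
    judgeDoubleLoop num_list count fuel
      = jd' ((num_list.getD 1 []).drop count) (judgeThree_r num_list) := by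
  induction fuel generalizing count with
  | zero =>
      rw [judgeDoubleLoop]
      have hnil : (num_list.getD 1 []).drop count = [] := List.drop_eq_nil_of_le (by omega)
      rw [hnil]
      rfl
  | succ f ih =>
      rw [judgeDoubleLoop]
      set xs := num_list.getD 1 [] with hxs
      by_cases h : count + 1 < xs.length
      · have h0 : count < xs.length := by omega
        have g0 : xs.getD count 0 = xs[count] := List.getD_eq_getElem xs 0 h0
        have g1 : xs.getD (count+1) 0 = xs[count+1] := List.getD_eq_getElem xs 0 h
        rw [List.drop_eq_getElem_cons h0, List.drop_eq_getElem_cons h, jd']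
        rw [if_pos h, g0, g1]
        by_cases heq : xs[count] = judgeThree_r num_list
        · rw [if_pos heq, if_pos heq, ih (count+1) (by omega), List.drop_eq_getElem_cons h]
        · rw [if_neg heq, if_neg heq]
          by_cases heq2 : xs[count] = xs[count+1]
          · rw [if_pos heq2, if_pos heq2]
          · rw [if_neg heq2, if_neg heq2, ih (count+1) (by omega), List.drop_eq_getElem_cons h]
      · rw [if_neg h, jd'_short]
        simp only [List.length_drop]
        omega

-- the foldl cons-accumulator computes rleFrom, reversed
lemma foldl_rleStep (l : List Int) :
    ∀ (w : Int) (n : Nat) (rs : List (Int × Nat)),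
    List.foldl rleStep ((w, n) :: rs) l = (rleFrom w n l).reverse ++ rs := by
  induction l with
  | nil => intro w n rs; simp [rleFrom]
  | cons v rest ih =>
      intro w n rs
      by_cases hv : v = w
      · subst hv
        simp [List.foldl_cons, rleStep, rleFrom, ih]
      · have hv' : ¬ w = v := fun h => hv h.symm
        simp only [List.foldl_cons, rleStep, if_neg hv', rleFrom, if_neg hv, ih]
        simp

-- jt' over a run prefix whose value does not continue into r
lemma jt'_run (n : Nat) (v : Int) (r : List Int) (hr : r.head? ≠ some v) :
    jt' (List.replicate n v ++ r) = if 3 ≤ n then v else jt' r := by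
  match n with
  | 0 => simp
  | 1 =>
      simp only [List.replicate_one, List.singleton_append]
      rw [if_neg (by omega)]
      match r, hr with
      | [], _ => rfl
      | [b], _ => rfl
      | b :: c :: rest, hr =>
          have hb : ¬ v = b := by
            intro h; exact hr (by simp [h])
          show jt' (v :: b :: c :: rest) = jt' (b :: c :: rest)
          rw [jt', if_neg (fun hc => hb hc.1)]
  | 2 =>
      rw [if_neg (by omega)]
      show jt' (v :: v :: ([] ++ r)) = jt' r
      simp only [List.nil_append]
      match r, hr with
      | [], _ => rfl
      | c :: rest, hr =>
          have hc : ¬ v = c := by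
            intro h; exact hr (by simp [h])
          show jt' (v :: v :: c :: rest) = jt' (c :: rest)
          rw [jt', if_neg (fun h => hc h.2)]
          have := jt'_run 1 v (c :: rest) hr
          simpa using this
  | m + 3 =>
      rw [if_pos (by omega)]
      show jt' (v :: v :: v :: (List.replicate m v ++ r)) = v
      rw [jt', if_pos ⟨rfl, rfl⟩]

-- jd' over a run prefix whose value does not continue into r
lemma jd'_run (n : Nat) (v t : Int) (r : List Int) (hr : r.head? ≠ some v) :
    jd' (List.replicate n v ++ r) t = if 2 ≤ n ∧ v ≠ t then true else jd' r t := by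
  induction n with
  | zero => simp
  | succ m ih =>
      match m, r, hr with
      | 0, [], _ => simp [jd']
      | 0, b :: rest, hr =>
          have hb : ¬ v = b := by
            intro h; exact hr (by simp [h])
          show jd' (v :: b :: rest) t = _
          rw [if_neg (by omega), jd', if_neg hb]
          by_cases hvt : v = t
          · rw [if_pos hvt]
          · rw [if_neg hvt]
      | m' + 1, r, hr =>
          show jd' (v :: (List.replicate (m'+1) v ++ r)) t = _
          have hcons : List.replicate (m'+1) v ++ r = v :: (List.replicate m' v ++ r) := by
            simp [List.replicate_succ]
          rw [hcons, jd', ← hcons]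
          by_cases hvt : v = t
          · rw [if_pos hvt, ih, if_neg (by tauto), if_neg (by tauto)]
          · rw [if_neg hvt, if_pos rfl, if_pos ⟨by omega, hvt⟩]

lemma jt'_eq_pickT (l : List Int) : ∀ (w : Int) (n : Nat), 1 ≤ n →
    jt' (List.replicate n w ++ l) = pickT (rleFrom w n l) := by
  induction l with
  | nil =>
      intro w n _
      rw [jt'_run n w [] (by simp), rleFrom, pickT_cons]
      by_cases h3 : 3 ≤ n
      · rw [if_pos h3, if_pos h3]
      · rw [if_neg h3, if_neg h3]
        rfl
  | cons v rest ih =>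
      intro w n hn
      by_cases hv : v = w
      · subst hv
        have hrep : List.replicate n v ++ v :: rest = List.replicate (n+1) v ++ rest := by
          simp [List.replicate_succ']
        rw [hrep, ih v (n+1) (by omega), rleFrom, if_pos rfl]
      · rw [jt'_run n w (v :: rest) (by simpa using hv),
            rleFrom, if_neg hv, pickT_cons]
        by_cases h3 : 3 ≤ n
        · rw [if_pos h3, if_pos h3]
        · rw [if_neg h3, if_neg h3]
          have := ih v 1 (by omega)
          simpa using this

lemma jd'_eq_any (l : List Int) : ∀ (w t : Int) (n : Nat), 1 ≤ n →
    jd' (List.replicate n w ++ l) t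
      = (rleFrom w n l).any (fun p => decide (2 ≤ p.2) && decide (p.1 ≠ t)) := by
  induction l with
  | nil =>
      intro w t n _
      rw [jd'_run n w t [] (by simp), rleFrom]
      simp only [List.any_cons, List.any_nil, Bool.or_false]
      by_cases h2 : 2 ≤ n ∧ w ≠ t
      · rw [if_pos h2]
        simp [h2.1, h2.2]
      · have e0 : jd' ([] : List Int) t = false := rfl
        rw [if_neg h2, e0]
        by_cases hn2 : 2 ≤ n
        · have hwt : w = t := by tauto
          simp [hwt]
        · simp [hn2]
  | cons v rest ih =>
      intro w t n hn
      by_cases hv : v = w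
      · subst hv
        have hrep : List.replicate n v ++ v :: rest = List.replicate (n+1) v ++ rest := by
          simp [List.replicate_succ']
        rw [hrep, ih v t (n+1) (by omega), rleFrom, if_pos rfl]
      · rw [jd'_run n w t (v :: rest) (by simpa using hv),
            rleFrom, if_neg hv]
        simp only [List.any_cons]
        have hih := ih v t 1 (by omega)
        simp only [List.replicate_one, List.singleton_append] at hih
        by_cases h2 : 2 ≤ n ∧ w ≠ t
        · rw [if_pos h2]
          simp [h2.1, h2.2]
        · rw [if_neg h2, hih]
          by_cases hn2 : 2 ≤ n
          · have hwt : w = t := by tauto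
            simp [hwt]
          · simp [hn2]

lemma main_aux (xs : List Int) :
    jd' xs (jt' xs)
      = ((xs.foldl rleStep []).reverse).any
          (fun p => decide (2 ≤ p.2) && decide (p.1 ≠ pickT ((xs.foldl rleStep []).reverse))) := by
  match xs with
  | [] => rfl
  | x :: rest =>
      have hruns : (List.foldl rleStep [] (x :: rest)).reverse = rleFrom x 1 rest := by
        simp only [List.foldl_cons, rleStep]
        rw [foldl_rleStep]
        simp
      rw [hruns]
      have h1 : jt' (x :: rest) = pickT (rleFrom x 1 rest) := by
        have := jt'_eq_pickT rest x 1 (by omega)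
        simpa using this
      have h2 : jd' (x :: rest) (pickT (rleFrom x 1 rest))
          = (rleFrom x 1 rest).any
              (fun p => decide (2 ≤ p.2) && decide (p.1 ≠ pickT (rleFrom x 1 rest))) := by
        have := jd'_eq_any rest x (pickT (rleFrom x 1 rest)) 1 (by omega)
        simpa using this
      rw [h1, h2]

-- ===== VERDICT (by name: the statement is the Claim_ definition above) =====
theorem judgeDoubleandThree_spec : Claim_equal_judgeDoubleandThree := by
  intro num_list _ _
  unfold Spec_judgeDoubleandThree judgeDoubleandThree judgeDoubleandThree_alt
  rw [jdLoop_eq_jd' num_list 0 _ (by omega), List.drop_zero]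
  have ht : judgeThree_r num_list = jt' (num_list.getD 1 []) := by
    rw [judgeThree_r, jtLoop_eq_jt' _ 0 _ (by omega), List.drop_zero]
  rw [ht]
  exact main_aux (num_list.getD 1 [])
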